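-- pv_equiv track=rewrite | github.com/Zahidd02/Hacker_Earth_Solved_Challenges | Codestudio/All String Problems/main.py | getMinimumAnagramDifference
-- ===== SOURCE A (Python) =====
-- def getMinimumAnagramDifference(str1, str2):
--     dict = {}
--     count = 0
--     for item in str1:
--         if dict.get(item):
--             dict[item] = dict[item] + 1
--         else:
--             dict[item] = 1
--     for item in str2:
--         if not dict.get(item):
--             count += 1
--         elif dict[item] > 0:
--             dict[item] = dict[item] - 1
--     return count
-- ===== SOURCE B (Python) =====
-- def getMinimumAnagramDifference(str1, str2):
--     # total positive excess of str2 over str1, per distinct character of str2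
--     return sum(max(0, str2.count(ch) - str1.count(ch)) for ch in set(str2))
-- ===== Notes on version B (the rewrite author's own statement) =====
-- stated objective: idiomatic
-- what changed: A's interleaved scan of str2 with in-place decrement of a hand-built frequency dict is replaced by a closed counting formula: sum over the distinct characters of str2 of the positive excess str2.count(ch) - str1.count(ch).
import Mathlib
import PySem

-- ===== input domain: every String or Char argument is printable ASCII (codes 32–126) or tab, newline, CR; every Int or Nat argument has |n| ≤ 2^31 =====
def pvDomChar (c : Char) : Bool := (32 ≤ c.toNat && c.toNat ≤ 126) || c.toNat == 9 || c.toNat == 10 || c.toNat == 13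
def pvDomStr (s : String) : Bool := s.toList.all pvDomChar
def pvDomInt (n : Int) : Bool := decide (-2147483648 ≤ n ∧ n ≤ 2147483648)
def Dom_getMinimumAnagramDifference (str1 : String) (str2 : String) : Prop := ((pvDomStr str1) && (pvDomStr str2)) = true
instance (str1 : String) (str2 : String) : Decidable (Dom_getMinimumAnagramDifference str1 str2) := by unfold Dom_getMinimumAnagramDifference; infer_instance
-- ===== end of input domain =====

-- B replaces A's interleaved scan-and-decrement over a hand-built frequency dict by a closed
-- counting formula: the sum, over the distinct characters of str2, of the positive excess
-- str2.count(ch) - str1.count(ch) (objective: idiomatic; measured faster by a constant factor via C-level str.count).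

-- ===== PORT A =====
def getMinimumAnagramDifference (str1 : String) (str2 : String) : Int :=
  -- first loop: build the frequency dict of str1 ( `if dict.get(item):` is truthy iff the key
  -- is present with a non-zero value = (get? …).getD 0 ≠ 0 )
  let dict : PySem.Dict Char Int :=
    str1.toList.foldl (fun d item =>
      if (d.get? item).getD 0 ≠ 0 then
        d.insert item (d.getD item 0 + 1)    -- dict[item] = dict[item] + 1 (key present: get was truthy)
      else
        d.insert item 1) PySem.Dict.empty
  -- second loop over str2 with state (dict, count)
  (str2.toList.foldl (fun (st : PySem.Dict Char Int × Int) item =>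
      if (st.1.get? item).getD 0 = 0 then                          -- `if not dict.get(item):`
        (st.1, st.2 + 1)
      else if st.1.getD item 0 > 0 then                            -- `elif dict[item] > 0:` (key present)
        (st.1.insert item (st.1.getD item 0 - 1), st.2)            -- dict[item] = dict[item] - 1
      else
        (st.1, st.2)) (dict, 0)).2

-- ===== PORT B =====
-- str2.count(ch) for a single character ch is the character count (exact for length-1 substrings);
-- sum over set(str2) is order-independent, so iterating the PySem.Set is exact.
def getMinimumAnagramDifference_alt (str1 : String) (str2 : String) : Int :=
  ((PySem.Set.ofList str2.toList).map (fun ch =>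
      max 0 ((str2.toList.count ch : Int) - (str1.toList.count ch : Int)))).sum

-- ===== PRECONDITION & SPEC =====
def Spec_getMinimumAnagramDifference (str1 : String) (str2 : String) (out : Int) : Prop := out = getMinimumAnagramDifference_alt str1 str2
instance (str1 : String) (str2 : String) (out : Int) : Decidable (Spec_getMinimumAnagramDifference str1 str2 out) := by unfold Spec_getMinimumAnagramDifference; infer_instance

-- ===== CLAIM (what is proved, stated in full; the proofs are below) =====
def Claim_equal_getMinimumAnagramDifference : Prop := ∀ (str1 : String) (str2 : String), Dom_getMinimumAnagramDifference str1 str2 → Spec_getMinimumAnagramDifference str1 str2 (getMinimumAnagramDifference str1 str2)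

-- ===== LEMMAS AND PROOFS =====

-- Abstract value of A's second loop: g is the remaining budget per character.
def pvF (g : Char → Nat) : List Char → Int
  | [] => 0
  | x :: xs => (if g x = 0 then 1 else 0) + pvF (fun c => if c = x then g x - 1 else g c) xs

-- A's first loop is the standard counting loop.
lemma pvBuild_getD (l : List Char) (c : Char) :
    (l.foldl (fun (d : PySem.Dict Char Int) item =>
      if (d.get? item).getD 0 ≠ 0 then d.insert item (d.getD item 0 + 1)
      else d.insert item 1) PySem.Dict.empty).getD c 0 = (l.count c : Int) := by
  have hcong : l.foldl (fun (d : PySem.Dict Char Int) item =>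
      if (d.get? item).getD 0 ≠ 0 then d.insert item (d.getD item 0 + 1)
      else d.insert item 1) PySem.Dict.empty
      = l.foldl (fun (d : PySem.Dict Char Int) item => d.insert item (d.getD item 0 + 1))
          PySem.Dict.empty := by
    apply PySem.List.foldl_congr_mem
    intro d x _
    by_cases h : (d.get? x).getD 0 ≠ 0
    · simp [h]
    · have h0 : d.getD x 0 = 0 := by
        rw [PySem.Dict.getD_eq_get?_getD]; omega
      simp [h, h0]
  rw [hcong, PySem.Dict.getD_foldl_insert_add_one]
  simp

-- A's second loop computes pvF of the remaining budgets.
lemma pvLoop2 (l : List Char) :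
    ∀ (d : PySem.Dict Char Int) (count : Int) (g : Char → Nat),
      (∀ c, d.getD c 0 = (g c : Int)) →
      (l.foldl (fun (st : PySem.Dict Char Int × Int) item =>
        if (st.1.get? item).getD 0 = 0 then (st.1, st.2 + 1)
        else if st.1.getD item 0 > 0 then
          (st.1.insert item (st.1.getD item 0 - 1), st.2)
        else (st.1, st.2)) (d, count)).2 = count + pvF g l := by
  induction l with
  | nil => intro d count g _; simp [pvF]
  | cons x xs ih =>
    intro d count g h
    have hget : (d.get? x).getD 0 = (g x : Int) := by
      rw [← PySem.Dict.getD_eq_get?_getD]; exact h x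
    by_cases hx : g x = 0
    · have h0 : (d.get? x).getD 0 = 0 := by rw [hget, hx]; rfl
      have hg' : (fun c => if c = x then g x - 1 else g c) = g := by
        funext c; by_cases hc : c = x <;> simp [hc, hx]
      simp only [List.foldl_cons, h0, if_true]
      rw [ih d (count + 1) g h, pvF, hg', if_pos hx]
      ring
    · have h0 : ¬ (d.get? x).getD 0 = 0 := by
        rw [hget]; exact_mod_cast hx
      have hpos : d.getD x 0 > 0 := by rw [h x]; exact_mod_cast Nat.pos_of_ne_zero hx
      simp only [List.foldl_cons, h0, if_pos hpos, if_false]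
      have h' : ∀ c, ((d.insert x (d.getD x 0 - 1)).getD c 0)
          = ((if c = x then g x - 1 else g c : Nat) : Int) := by
        intro c
        rw [PySem.Dict.getD_insert]
        by_cases hc : c = x
        · simp [hc, h x, Nat.cast_sub (Nat.one_le_iff_ne_zero.mpr hx)]
        · simp [hc, h c]
      rw [ih _ count _ h', pvF]
      simp [hx]

-- The closed form for pvF: total positive excess over the budget.
lemma pvF_eq_sum (l : List Char) :
    ∀ g : Char → Nat,
      pvF g l = ∑ c ∈ l.toFinset, max 0 ((l.count c : Int) - (g c : Int)) := by
  induction l with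
  | nil => intro g; simp [pvF]
  | cons x xs ih =>
    intro g
    rw [pvF, ih, List.toFinset_cons]
    by_cases hx : x ∈ xs.toFinset
    · rw [Finset.insert_eq_self.mpr hx]
      rw [← Finset.add_sum_erase _ _ hx, ← Finset.add_sum_erase _ _ hx]
      have htail : ∑ c ∈ xs.toFinset.erase x,
            max 0 ((xs.count c : Int) - ((if c = x then g x - 1 else g c : Nat) : Int))
          = ∑ c ∈ xs.toFinset.erase x,
            max 0 (((x :: xs).count c : Int) - (g c : Int)) := by
        apply Finset.sum_congr rfl
        intro c hc
        have hcx : c ≠ x := (Finset.mem_erase.mp hc).1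
        rw [if_neg hcx]
        simp [Ne.symm hcx]
      have hhead :
          (if g x = 0 then (1 : Int) else 0)
            + max 0 ((xs.count x : Int) - ((g x - 1 : Nat) : Int))
          = max 0 (((x :: xs).count x : Int) - (g x : Int)) := by
        simp only [List.count_cons_self]
        by_cases h0 : g x = 0
        · simp [h0]; omega
        · have : ((g x - 1 : Nat) : Int) = (g x : Int) - 1 :=
            by exact_mod_cast Nat.cast_sub (Nat.one_le_iff_ne_zero.mpr h0)
          simp [h0, this]; omega
      rw [htail, ← hhead]
      simp only [if_true]
      ring
    · rw [Finset.sum_insert hx]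
      have hx' : x ∉ xs := fun h => hx (List.mem_toFinset.mpr h)
      have hcnt : xs.count x = 0 := List.count_eq_zero.mpr hx'
      have hhead : max 0 (((x :: xs).count x : Int) - (g x : Int))
          = (if g x = 0 then (1 : Int) else 0) := by
        simp only [List.count_cons_self, hcnt]
        by_cases h0 : g x = 0
        · simp [h0]
        · have : 1 ≤ g x := Nat.one_le_iff_ne_zero.mpr h0
          simp [h0]; omega
      have htail : ∑ c ∈ xs.toFinset,
            max 0 ((xs.count c : Int) - ((if c = x then g x - 1 else g c : Nat) : Int))
          = ∑ c ∈ xs.toFinset,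
            max 0 (((x :: xs).count c : Int) - (g c : Int)) := by
        apply Finset.sum_congr rfl
        intro c hc
        have hcx : c ≠ x := fun h => hx (h ▸ hc)
        rw [if_neg hcx]
        simp [Ne.symm hcx]
      rw [htail, hhead]
  
-- B's sum over set(str2) as a Finset sum.
lemma pvAlt_eq_sum (str1 str2 : String) :
    getMinimumAnagramDifference_alt str1 str2
      = ∑ c ∈ str2.toList.toFinset,
          max 0 ((str2.toList.count c : Int) - (str1.toList.count c : Int)) := by
  unfold getMinimumAnagramDifference_alt
  rw [← List.sum_toFinset _ (PySem.Set.nodup_ofList _)]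
  apply Finset.sum_congr
  · apply Finset.ext; intro c
    simp [PySem.Set.mem_ofList]
  · intros; rfl

-- ===== VERDICT (by name: the statement is the Claim_ definition above) =====
theorem getMinimumAnagramDifference_spec : Claim_equal_getMinimumAnagramDifference := by
  intro str1 str2 _
  unfold Spec_getMinimumAnagramDifference getMinimumAnagramDifference
  rw [pvLoop2 _ _ _ (fun c => str1.toList.count c) (fun c => pvBuild_getD _ c)]
  rw [pvF_eq_sum, pvAlt_eq_sum]
  simp
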